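-- pv_equiv track=rewrite | github.com/aliyesilli/codesignal | Arcade/Intro/28_alphabeticShift.py | alphabeticShift
-- ===== SOURCE A (Python) =====
-- def alphabeticShift(inputString):
--     a = 'abcdefghijklmnopqrstuvwxyz'
--     b = list(inputString)
--     c = []
--     d= [['z','a']]
--     for i in range(len(b)):
--     	if b[i] == 'z':
--     		pass
--     	elif b[i] not in c:
--     		c.append(b[i])
--     		d += [[a[a.find(b[i])],a[a.find(b[i])+1]]]
--     for i in range(len(b)):
--     	for j in range(len(d)):
--     		if b[i] == d[j][0]:
--     			b[i] = d[j][1]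
--     			break
--     return ''.join(b)
-- ===== SOURCE B (Python) =====
-- def alphabeticShift(inputString):
--     return ''.join(
--         chr((ord(ch) - 97 + 1) % 26 + 97) if 'a' <= ch <= 'z' else ch
--         for ch in inputString
--     )
-- ===== Notes on version B (the rewrite author's own statement) =====
-- stated objective: simpler
-- what changed: Replaces the two-pass scheme (building a deduplicated char-to-successor mapping table, then rescanning that table for every character) with a single pass that shifts each lowercase letter directly by modular arithmetic on its code point.
import Mathlib
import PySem

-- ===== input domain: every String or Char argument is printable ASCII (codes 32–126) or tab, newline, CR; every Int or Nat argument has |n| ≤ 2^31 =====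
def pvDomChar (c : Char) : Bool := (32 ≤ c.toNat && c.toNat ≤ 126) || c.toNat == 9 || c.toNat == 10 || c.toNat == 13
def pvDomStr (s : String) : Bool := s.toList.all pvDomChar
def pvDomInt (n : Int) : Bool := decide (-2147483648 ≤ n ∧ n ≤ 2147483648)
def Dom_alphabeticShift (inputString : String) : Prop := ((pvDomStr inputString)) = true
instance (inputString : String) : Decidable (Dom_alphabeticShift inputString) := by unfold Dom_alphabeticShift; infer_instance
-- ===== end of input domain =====

-- B replaces A's table-building + table-scanning double pass by one direct modular
-- shift per character (simpler, single pass).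

-- ===== PORT A =====
def pvAlpha : List Char := "abcdefghijklmnopqrstuvwxyz".toList

-- the table entry A appends: [a[a.find(b[i])], a[a.find(b[i])+1]]; the indices are
-- always in range here (find yields -1..24 since 'z' is skipped), so pyGetD's
-- default is never used (Python a[-1] wraps to 'z', as pyGetD does via pyGet?)
def pvKeyA (x : Char) : Char :=
  PySem.List.pyGetD pvAlpha (PySem.Chars.find pvAlpha [x]) ' '
def pvValA (x : Char) : Char :=
  PySem.List.pyGetD pvAlpha (PySem.Chars.find pvAlpha [x] + 1) ' '

-- first-pass loop body; state = (c, d)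
def pvStepA (st : List Char × List (Char × Char)) (x : Char) :
    List Char × List (Char × Char) :=
  if x = 'z' then st
  else if x ∈ st.1 then st
  else (st.1 ++ [x], st.2 ++ [(pvKeyA x, pvValA x)])

-- second-pass inner loop: replace by the first matching entry, else keep
def pvLookupA (x : Char) : List (Char × Char) → Char
  | [] => x
  | (k, v) :: rest => if x = k then v else pvLookupA x rest

def alphabeticShift (inputString : String) : String :=
  let b := inputString.toList
  let cd := b.foldl pvStepA ([], [('z', 'a')])
  String.mk (b.map (fun x => pvLookupA x cd.2))

-- ===== PORT B =====
def pvShift1 (ch : Char) : Char :=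
  if 'a' ≤ ch ∧ ch ≤ 'z' then Char.ofNat ((ch.toNat - 97 + 1) % 26 + 97) else ch

def alphabeticShift_alt (inputString : String) : String :=
  String.mk (inputString.toList.map pvShift1)

-- ===== PRECONDITION & SPEC =====
def Spec_alphabeticShift (inputString : String) (out : String) : Prop := out = alphabeticShift_alt inputString
instance (inputString : String) (out : String) : Decidable (Spec_alphabeticShift inputString out) := by unfold Spec_alphabeticShift; infer_instance

-- ===== CLAIM (what is proved, stated in full; the proofs are below) =====
def Claim_equal_alphabeticShift : Prop := ∀ (inputString : String), Dom_alphabeticShift inputString → Spec_alphabeticShift inputString (alphabeticShift inputString)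

-- ===== LEMMAS AND PROOFS =====

def pvLower (x : Char) : Bool := decide ('a' ≤ x ∧ x ≤ 'z')

theorem pvShift1_of_not_lower (x : Char) (h : pvLower x = false) : pvShift1 x = x := by
  simp [pvLower] at h
  simp [pvShift1]
  intro h1 h2
  exact absurd h2 (not_le.mpr (h h1))

-- the character-level fact about A's table entry, checked for all 127 relevant codes
set_option maxRecDepth 4000 in
theorem pvEntry127 : ∀ n : Fin 127, (Char.ofNat n ≠ 'z') →
    pvLower (pvKeyA (Char.ofNat n)) = true ∧
    pvValA (Char.ofNat n) = pvShift1 (pvKeyA (Char.ofNat n)) ∧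
    (pvLower (Char.ofNat n) = true → pvKeyA (Char.ofNat n) = Char.ofNat n) := by
  decide

theorem pvEntry_spec (x : Char) (hx : pvDomChar x = true) (hz : x ≠ 'z') :
    pvLower (pvKeyA x) = true ∧ pvValA x = pvShift1 (pvKeyA x) ∧
    (pvLower x = true → pvKeyA x = x) := by
  have hle : x.toNat < 127 := by
    simp [pvDomChar] at hx
    omega
  have h := pvEntry127 ⟨x.toNat, hle⟩
  simp only [Char.ofNat_toNat] at h
  exact h hz

def pvKeyInv (d : List (Char × Char)) : Prop :=
  ∀ p ∈ d, pvLower p.1 = true ∧ p.2 = pvShift1 p.1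

theorem pvLookupA_not_mem (x : Char) (d : List (Char × Char))
    (h : x ∉ d.map Prod.fst) : pvLookupA x d = x := by
  induction d with
  | nil => rfl
  | cons p rest ih =>
    obtain ⟨k, v⟩ := p
    rw [List.map_cons, List.mem_cons, not_or] at h
    simp only [pvLookupA, if_neg h.1]
    exact ih h.2

theorem pvLookupA_mem (x : Char) (d : List (Char × Char))
    (h1 : ∀ p ∈ d, p.2 = pvShift1 p.1) (h2 : x ∈ d.map Prod.fst) :
    pvLookupA x d = pvShift1 x := by
  induction d with
  | nil => simp at h2
  | cons p rest ih =>
    obtain ⟨k, v⟩ := p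
    rw [List.map_cons, List.mem_cons] at h2
    by_cases hxk : x = k
    · subst hxk
      simpa [pvLookupA] using h1 (x, v) (by simp)
    · simp only [pvLookupA, if_neg hxk]
      refine ih (fun p hp => h1 p (by simp [hp])) ?_
      rcases h2 with h2 | h2
      · exact absurd h2 hxk
      · exact h2

theorem pvFold_inv (b : List Char) :
    ∀ c d, (∀ x ∈ b, pvDomChar x = true) → pvKeyInv d → 'z' ∈ d.map Prod.fst →
    (∀ y ∈ c, pvLower y = true → y ∈ d.map Prod.fst) →
    pvKeyInv (List.foldl pvStepA (c, d) b).2 ∧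
    'z' ∈ (List.foldl pvStepA (c, d) b).2.map Prod.fst ∧
    (∀ y ∈ c, pvLower y = true → y ∈ (List.foldl pvStepA (c, d) b).2.map Prod.fst) ∧
    (∀ y ∈ b, pvLower y = true → y ∈ (List.foldl pvStepA (c, d) b).2.map Prod.fst) := by
  induction b with
  | nil => intro c d _ h1 h2 h3; exact ⟨h1, h2, h3, by simp⟩
  | cons x rest ih =>
    intro c d hb h1 h2 h3
    have hbrest : ∀ y ∈ rest, pvDomChar y = true := fun y hy => hb y (by simp [hy])
    have hx : pvDomChar x = true := hb x (by simp)
    rw [List.foldl_cons]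
    by_cases hz : x = 'z'
    · have hst : pvStepA (c, d) x = (c, d) := by simp [pvStepA, hz]
      rw [hst]
      obtain ⟨i1, i2, i3, i4⟩ := ih c d hbrest h1 h2 h3
      refine ⟨i1, i2, i3, fun y hy hly => ?_⟩
      rcases List.mem_cons.mp hy with rfl | hy
      · exact hz ▸ i2
      · exact i4 y hy hly
    · by_cases hmem : x ∈ c
      · have hst : pvStepA (c, d) x = (c, d) := by simp [pvStepA, hz, hmem]
        rw [hst]
        obtain ⟨i1, i2, i3, i4⟩ := ih c d hbrest h1 h2 h3
        refine ⟨i1, i2, i3, fun y hy hly => ?_⟩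
        rcases List.mem_cons.mp hy with rfl | hy
        · exact i3 y hmem hly
        · exact i4 y hy hly
      · have hst : pvStepA (c, d) x = (c ++ [x], d ++ [(pvKeyA x, pvValA x)]) := by
          simp [pvStepA, hz, hmem]
        rw [hst]
        obtain ⟨e1, e2, e3⟩ := pvEntry_spec x hx hz
        have h1' : pvKeyInv (d ++ [(pvKeyA x, pvValA x)]) := by
          intro p hp
          rcases List.mem_append.mp hp with hp | hp
          · exact h1 p hp
          · simp at hp; subst hp; exact ⟨e1, e2⟩
        have h2' : 'z' ∈ (d ++ [(pvKeyA x, pvValA x)]).map Prod.fst := by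
          simp at h2 ⊢; tauto
        have h3' : ∀ y ∈ c ++ [x], pvLower y = true →
            y ∈ (d ++ [(pvKeyA x, pvValA x)]).map Prod.fst := by
          intro y hy hly
          rcases List.mem_append.mp hy with hy | hy
          · have := h3 y hy hly
            simp at this ⊢; tauto
          · simp at hy; subst hy
            exact List.mem_map.mpr ⟨(pvKeyA y, pvValA y), by simp, e3 hly⟩
        obtain ⟨i1, i2, i3, i4⟩ := ih (c ++ [x]) _ hbrest h1' h2' h3'
        refine ⟨i1, i2, fun y hy hly => i3 y (by simp [hy]) hly, fun y hy hly => ?_⟩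
        rcases List.mem_cons.mp hy with rfl | hy
        · exact i3 y (by simp) hly
        · exact i4 y hy hly

-- ===== VERDICT (by name: the statement is the Claim_ definition above) =====
theorem alphabeticShift_spec : Claim_equal_alphabeticShift := by
  intro s hdom
  unfold Spec_alphabeticShift alphabeticShift alphabeticShift_alt
  have hb : ∀ x ∈ s.toList, pvDomChar x = true := by
    simpa [Dom_alphabeticShift, pvDomStr, List.all_eq_true] using hdom
  have hinit1 : pvKeyInv [('z', 'a')] := by
    intro p hp; simp at hp; subst hp; constructor <;> decide
  obtain ⟨i1, i2, _, i4⟩ := pvFold_inv s.toList [] [('z', 'a')] hb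
    hinit1 (by decide) (by simp)
  show String.mk (s.toList.map
      (fun x => pvLookupA x (List.foldl pvStepA ([], [('z', 'a')]) s.toList).2)) =
    String.mk (s.toList.map pvShift1)
  congr 1
  apply List.map_congr_left
  intro x hx
  by_cases hl : pvLower x = true
  · exact pvLookupA_mem x _ (fun p hp => (i1 p hp).2) (i4 x hx hl)
  · have hnl : pvLower x = false := by simpa using hl
    have hnm : x ∉ (List.foldl pvStepA ([], [('z', 'a')]) s.toList).2.map Prod.fst := by
      intro hmem
      obtain ⟨p, hp, hpx⟩ := List.mem_map.mp hmem
      have hlp := (i1 p hp).1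
      rw [hpx] at hlp
      simp [hnl] at hlp
    rw [pvLookupA_not_mem x _ hnm, pvShift1_of_not_lower x hnl]
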